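-- pv_equiv track=rewrite | github.com/pv2k3/greenery_report_generator | step2.py | parse
-- ===== SOURCE A (Python) =====
-- from typing import Dict, List, Optional
--
-- def parse(text: str) -> Dict:
--     try:
--         lines = text.strip().split('\n')
--         recommendations = []
--         current_plant = {}
--
--         for line in lines:
--             line = line.strip()
--             if line.startswith('Plant:') or line.startswith('**Plant:'):
--                 if current_plant:
--                     recommendations.append(current_plant)
--                 current_plant = {'name': line.split(':', 1)[1].strip().replace('**', '')}
--             elif line.startswith('Reason:') or line.startswith('**Reason:'):
--                 current_plant['reason'] = line.split(':', 1)[1].strip().replace('**', '')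
--             elif line.startswith('Care:') or line.startswith('**Care:'):
--                 current_plant['care'] = line.split(':', 1)[1].strip().replace('**', '')
--
--         if current_plant:
--             recommendations.append(current_plant)
--
--         return {
--             'recommendations': recommendations,
--         }
--     except Exception as e:
--         return {
--             'recommendations': [],
--             'error': str(e)
--         }
-- ===== SOURCE B (Python) =====
-- def _is_header(line):
--     return line.startswith('Plant:') or line.startswith('**Plant:')
--
--
-- def _value(line):
--     return line.split(':', 1)[1].strip().replace('**', '')
--
--
-- def _fill(block):
--     record = {}
--     if block and _is_header(block[0]):
--         record['name'] = _value(block[0])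
--         block = block[1:]
--     for line in block:
--         if line.startswith('Reason:') or line.startswith('**Reason:'):
--             record['reason'] = _value(line)
--         elif line.startswith('Care:') or line.startswith('**Care:'):
--             record['care'] = _value(line)
--     return record
--
--
-- def parse(text: str):
--     lines = [line.strip() for line in text.strip().split('\n')]
--     blocks = []
--     current = []
--     for line in lines:
--         if _is_header(line):
--             blocks.append(current)
--             current = [line]
--         else:
--             current.append(line)
--     blocks.append(current)
--     return {'recommendations': [r for r in map(_fill, blocks) if r]}
-- ===== Notes on version B (the rewrite author's own statement) =====
-- stated objective: alternative
-- what changed: A threads one mutable current-plant dict through a single stateful line loop; B first partitions the stripped lines into blocks starting at each Plant:/**Plant: header (plus the leading headerless block) and then maps each block independently to its record, filtering out empty ones.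
import Mathlib
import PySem

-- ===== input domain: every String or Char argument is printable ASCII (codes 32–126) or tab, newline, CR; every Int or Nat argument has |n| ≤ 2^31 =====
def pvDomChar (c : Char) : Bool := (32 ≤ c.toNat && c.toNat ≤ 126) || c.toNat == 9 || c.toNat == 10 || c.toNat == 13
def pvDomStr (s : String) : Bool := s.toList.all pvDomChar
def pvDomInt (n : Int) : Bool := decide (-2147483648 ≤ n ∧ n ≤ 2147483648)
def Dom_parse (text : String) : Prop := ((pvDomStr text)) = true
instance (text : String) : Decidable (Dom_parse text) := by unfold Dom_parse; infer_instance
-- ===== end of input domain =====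

-- B re-decomposes A's single stateful line loop into: partition lines into Plant-header blocks, then map each
-- block to a record (objective: alternative decomposition, same cost; return values proved equal).

-- shared value extraction: line.split(':', 1)[1].strip().replace('**', '')
-- (fallback [] is unreachable in both programs: every guarding prefix contains ':')
def pvValue (line : List Char) : List Char :=
  match PySem.Chars.splitOnMax line [':'] 1 with
  | [_, r] => PySem.Chars.replace (PySem.Chars.strip r) ['*', '*'] []
  | _ => []

-- ===== PORT A =====
-- the body of A's for-loop after 'line = line.strip()'
def pvBranchesA (st : List (PySem.Dict (List Char) (List Char)) × PySem.Dict (List Char) (List Char))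
    (line : List Char) :
    List (PySem.Dict (List Char) (List Char)) × PySem.Dict (List Char) (List Char) :=
  if PySem.Chars.startswith line "Plant:".toList || PySem.Chars.startswith line "**Plant:".toList then
    (if st.2.items ≠ [] then st.1 ++ [st.2] else st.1,
     PySem.Dict.ofList [("name".toList, pvValue line)])
  else if PySem.Chars.startswith line "Reason:".toList || PySem.Chars.startswith line "**Reason:".toList then
    (st.1, st.2.insert "reason".toList (pvValue line))
  else if PySem.Chars.startswith line "Care:".toList || PySem.Chars.startswith line "**Care:".toList then
    (st.1, st.2.insert "care".toList (pvValue line))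
  else st

-- shared rendering of {'recommendations': recs} into the convention's type
def pvOut (recs : List (PySem.Dict (List Char) (List Char))) :
    List (String × List (List (String × String))) :=
  [("recommendations", recs.map (fun d => d.items.map (fun p => (String.ofList p.1, String.ofList p.2))))]

-- A's try/except is dead code: no statement of the body can raise (split(':',1)[1] is guarded by a
-- startswith test whose prefix contains ':'), so the port is the try-body alone.
def parse (text : String) : List (String × List (List (String × String))) :=
  let lines := PySem.Chars.splitOn (PySem.Chars.strip text.toList) ['\n']
  let st := lines.foldl (fun st raw => pvBranchesA st (PySem.Chars.strip raw)) ([], PySem.Dict.empty)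
  pvOut (if st.2.items ≠ [] then st.1 ++ [st.2] else st.1)

-- ===== PORT B =====
def pvIsHeader (line : List Char) : Bool :=
  PySem.Chars.startswith line "Plant:".toList || PySem.Chars.startswith line "**Plant:".toList

def pvScanStep (d : PySem.Dict (List Char) (List Char)) (line : List Char) :
    PySem.Dict (List Char) (List Char) :=
  if PySem.Chars.startswith line "Reason:".toList || PySem.Chars.startswith line "**Reason:".toList then
    d.insert "reason".toList (pvValue line)
  else if PySem.Chars.startswith line "Care:".toList || PySem.Chars.startswith line "**Care:".toList then
    d.insert "care".toList (pvValue line)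
  else d

-- B's _fill: optional 'name' from a leading header, then scan the rest for Reason:/Care:
def pvFill (block : List (List Char)) : PySem.Dict (List Char) (List Char) :=
  match block with
  | b0 :: bs =>
    if pvIsHeader b0 then
      bs.foldl pvScanStep (PySem.Dict.empty.insert "name".toList (pvValue b0))
    else block.foldl pvScanStep PySem.Dict.empty
  | [] => PySem.Dict.empty

-- B's partition loop: start a new block at each header line
def pvStepB (st : List (List (List Char)) × List (List Char)) (line : List Char) :
    List (List (List Char)) × List (List Char) :=
  if pvIsHeader line then (st.1 ++ [st.2], [line]) else (st.1, st.2 ++ [line])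

def parse_alt (text : String) : List (String × List (List (String × String))) :=
  let lines := (PySem.Chars.splitOn (PySem.Chars.strip text.toList) ['\n']).map PySem.Chars.strip
  let st := lines.foldl pvStepB ([], [])
  pvOut (((st.1 ++ [st.2]).map pvFill).filter (fun d => !d.items.isEmpty))

-- ===== PRECONDITION & SPEC =====
def Spec_parse (text : String) (out : List (String × List (List (String × String)))) : Prop := out = parse_alt text
instance (text : String) (out : List (String × List (List (String × String)))) : Decidable (Spec_parse text out) := by unfold Spec_parse; infer_instance

-- ===== CLAIM (what is proved, stated in full; the proofs are below) =====
def Claim_equal_parse : Prop := ∀ (text : String), Dom_parse text → Spec_parse text (parse text)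

-- ===== LEMMAS AND PROOFS =====

-- B's emitted record list for a list of blocks
def pvEmit (bs : List (List (List Char))) : List (PySem.Dict (List Char) (List Char)) :=
  (bs.map pvFill).filter (fun d => !d.items.isEmpty)

theorem pvEmit_append (bs cs : List (List (List Char))) :
    pvEmit (bs ++ cs) = pvEmit bs ++ pvEmit cs := by
  simp [pvEmit]

theorem pvEmit_single (c : List (List Char)) :
    pvEmit [c] = if (pvFill c).items ≠ [] then [pvFill c] else [] := by
  by_cases h : (pvFill c).items = []
  · simp [pvEmit, h]
  · simp [pvEmit, h]

theorem pvFill_append (cur : List (List Char)) (ln : List Char) (h : pvIsHeader ln = false) :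
    pvFill (cur ++ [ln]) = pvScanStep (pvFill cur) ln := by
  cases cur with
  | nil => simp [pvFill, h]
  | cons c0 cs => by_cases hc : pvIsHeader c0 = true <;> simp [pvFill, hc, List.foldl_append]

theorem pv_main (L : List (List Char)) (blocks : List (List (List Char))) (cur : List (List Char)) :
    (let st := L.foldl pvBranchesA (pvEmit blocks, pvFill cur)
     if st.2.items ≠ [] then st.1 ++ [st.2] else st.1) =
    (let st := L.foldl pvStepB (blocks, cur)
     pvEmit (st.1 ++ [st.2])) := by
  induction L generalizing blocks cur with
  | nil =>
    simp only [List.foldl_nil, pvEmit_append, pvEmit_single]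
    split_ifs <;> simp
  | cons ln L ih =>
    simp only [List.foldl_cons]
    by_cases hp : (PySem.Chars.startswith ln "Plant:".toList
        || PySem.Chars.startswith ln "**Plant:".toList) = true
    · have hh : pvIsHeader ln = true := hp
      have h2 : pvEmit (blocks ++ [cur])
          = if (pvFill cur).items ≠ [] then pvEmit blocks ++ [pvFill cur] else pvEmit blocks := by
        rw [pvEmit_append, pvEmit_single]; split_ifs <;> simp
      have hfill1 : pvFill [ln] = PySem.Dict.ofList [("name".toList, pvValue ln)] := by
        simp only [pvFill, hh, if_pos, List.foldl_nil]
        rfl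
      have hstep : pvBranchesA (pvEmit blocks, pvFill cur) ln
          = (pvEmit (blocks ++ [cur]), pvFill [ln]) := by
        simp only [pvBranchesA]; rw [if_pos hp, h2, hfill1]
      have hsB : pvStepB (blocks, cur) ln = (blocks ++ [cur], [ln]) := by
        simp only [pvStepB, hh, if_pos]
      rw [hstep, hsB]; exact ih _ _
    · have hh : pvIsHeader ln = false := by simpa [pvIsHeader] using hp
      have hsB : pvStepB (blocks, cur) ln = (blocks, cur ++ [ln]) := by
        simp only [pvStepB, hh]; rfl
      have hstep : pvBranchesA (pvEmit blocks, pvFill cur) ln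
          = (pvEmit blocks, pvFill (cur ++ [ln])) := by
        rw [pvFill_append cur ln hh]
        simp only [pvBranchesA, pvScanStep]
        rw [if_neg hp]
        split_ifs <;> rfl
      rw [hstep, hsB]; exact ih _ _

theorem parse_eq_alt (text : String) : parse text = parse_alt text := by
  simp only [parse, parse_alt, List.foldl_map]
  refine congrArg pvOut ?_
  have h := pv_main ((PySem.Chars.splitOn (PySem.Chars.strip text.toList) ['\n']).map
    PySem.Chars.strip) [] []
  simp only [List.foldl_map] at h
  rw [show (pvEmit [] : List (PySem.Dict (List Char) (List Char))) = [] from rfl,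
    show pvFill [] = (PySem.Dict.empty : PySem.Dict (List Char) (List Char)) from rfl] at h
  simpa [pvEmit] using h

-- ===== VERDICT (by name: the statement is the Claim_ definition above) =====
theorem parse_spec : Claim_equal_parse := by
  intro text _
  unfold Spec_parse
  exact parse_eq_alt text
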